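-- pv_equiv track=rewrite | github.com/gabogara/python_session_1_2 | interviews.py | exclusive_elemts
-- ===== SOURCE A (Python) =====
-- def exclusive_elemts(lst1, lst2):
--     dict = {}
--     result = []
--
--     for elem in lst1:
--         if elem in dict:
--             dict[elem] += 1
--         else:
--             dict[elem] = 1
--
--     for elem in lst2:
--         if elem in dict:
--             dict[elem] += 1
--         else:
--             dict[elem] = 1
--     for key, value in dict.items():
--         if dict[key] == 1:
--             result.append(key)
--     return result
-- ===== SOURCE B (Python) =====
-- def exclusive_elemts(lst1, lst2):
--     combined = lst1 + lst2
--     return [x for x in combined if combined.count(x) == 1]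
-- ===== Notes on version B (the rewrite author's own statement) =====
-- stated objective: simpler
-- what changed: Replaces the two dict-counting loops plus an items-filter loop with a single comprehension over the concatenated list that keeps elements whose total occurrence count is 1 (same order: a count-1 element's only position is its first appearance).
import Mathlib
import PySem

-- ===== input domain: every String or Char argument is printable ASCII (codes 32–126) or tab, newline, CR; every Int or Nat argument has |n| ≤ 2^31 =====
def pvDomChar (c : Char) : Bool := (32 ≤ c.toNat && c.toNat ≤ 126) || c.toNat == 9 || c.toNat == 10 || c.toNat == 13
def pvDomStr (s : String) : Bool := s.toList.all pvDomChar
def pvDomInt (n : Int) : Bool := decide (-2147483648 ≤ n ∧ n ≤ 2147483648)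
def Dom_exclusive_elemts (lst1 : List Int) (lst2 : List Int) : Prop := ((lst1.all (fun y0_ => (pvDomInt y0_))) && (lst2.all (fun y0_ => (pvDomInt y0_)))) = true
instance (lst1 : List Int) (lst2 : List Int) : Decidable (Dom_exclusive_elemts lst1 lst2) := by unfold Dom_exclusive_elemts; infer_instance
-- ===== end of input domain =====

-- ===== PORT A =====
-- B replaces A's two dict-count loops + items filter by one comprehension over the
-- concatenated list (simpler, same return value; no speed claim).
-- Port of A. `dict[elem] += 1` / `dict[key]` are read with getD _ 0: the guarded
-- branch / the items loop guarantee the key is present, so getD is exact there.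
def exclusive_elemts (lst1 : List Int) (lst2 : List Int) : List Int :=
  let step : PySem.Dict Int Int → Int → PySem.Dict Int Int := fun d elem =>
    if d.contains elem then d.insert elem (d.getD elem 0 + 1) else d.insert elem 1
  let d1 := lst1.foldl step PySem.Dict.empty
  let d2 := lst2.foldl step d1
  d2.items.foldl (fun result kv => if d2.getD kv.1 0 == 1 then result ++ [kv.1] else result) []

-- ===== PORT B =====
def exclusive_elemts_alt (lst1 : List Int) (lst2 : List Int) : List Int :=
  let combined := lst1 ++ lst2
  combined.filter (fun x => combined.count x == 1)

-- ===== PRECONDITION & SPEC =====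
def Spec_exclusive_elemts (lst1 : List Int) (lst2 : List Int) (out : List Int) : Prop := out = exclusive_elemts_alt lst1 lst2
instance (lst1 : List Int) (lst2 : List Int) (out : List Int) : Decidable (Spec_exclusive_elemts lst1 lst2 out) := by unfold Spec_exclusive_elemts; infer_instance

-- ===== CLAIM (what is proved, stated in full; the proofs are below) =====
def Claim_equal_exclusive_elemts : Prop := ∀ (lst1 : List Int) (lst2 : List Int), Dom_exclusive_elemts lst1 lst2 → Spec_exclusive_elemts lst1 lst2 (exclusive_elemts lst1 lst2)

-- ===== LEMMAS AND PROOFS =====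

-- ===== VERDICT (by name: the statement is the Claim_ definition above) =====
-- the A-side step function is just `insert x (getD x 0 + 1)`
lemma step_eq (d : PySem.Dict Int Int) (x : Int) :
    (if d.contains x then d.insert x (d.getD x 0 + 1) else d.insert x 1)
      = d.insert x (d.getD x 0 + 1) := by
  by_cases h : d.contains x
  · simp [h]
  · have hc : d.contains x = false := by simpa using h
    rw [if_neg (by simp [hc]), PySem.Dict.getD_of_not_contains _ _ hc]
    norm_num

-- the result-accumulating loop is a filter+map
lemma foldl_app (l : List (Int × Int)) (acc : List Int) (q : Int × Int → Bool) :
    l.foldl (fun r kv => if q kv then r ++ [kv.1] else r) acc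
      = acc ++ (l.filter q).map (·.1) := by
  induction l generalizing acc with
  | nil => simp
  | cons a t ih => by_cases h : q a <;> simp [List.foldl_cons, h, ih]

-- filtering the first-occurrence dedup by a predicate that only holds on
-- count-≤-1 elements equals filtering the list itself
lemma foldl_add_filter (L : List Int) (s : List Int) (p : Int → Bool)
    (h : ∀ x, p x = true → (s ++ L).count x ≤ 1) :
    (L.foldl PySem.Set.add s).filter p = s.filter p ++ L.filter p := by
  induction L generalizing s with
  | nil => simp
  | cons a t ih =>
    simp only [List.foldl_cons]
    by_cases hm : a ∈ s
    · -- add is a no-op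
      have hadd : PySem.Set.add s a = s := by simp [PySem.Set.add, PySem.Set.contains, hm]
      have hpa : p a = false := by
        by_contra hpa
        have hpa' : p a = true := by simpa using hpa
        have hcnt := h a hpa'
        have h1 : 1 ≤ s.count a := List.one_le_count_iff.mpr hm
        simp only [List.count_append, List.count_cons_self] at hcnt
        omega
      rw [hadd, ih]
      · simp [hpa]
      · intro x hx
        have := h x hx
        simp only [List.count_append, List.count_cons] at *
        omega
    · -- fresh element: appended
      have hadd : PySem.Set.add s a = s ++ [a] := by
        simp [PySem.Set.add, PySem.Set.contains, hm]
      rw [hadd, ih]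
      · by_cases hpa : p a = true <;>
          simp [List.filter_append, hpa]
      · intro x hx
        have := h x hx
        simp only [List.count_append, List.count_cons, List.count_nil] at *
        omega

lemma counter_char (lst1 lst2 : List Int) :
    exclusive_elemts lst1 lst2
      = (PySem.Set.ofList (lst1 ++ lst2)).filter
          (fun k => ((lst1 ++ lst2).count k : Int) == 1) := by
  unfold exclusive_elemts
  have hstep : (fun (d : PySem.Dict Int Int) (elem : Int) =>
      if d.contains elem then d.insert elem (d.getD elem 0 + 1) else d.insert elem 1)
      = fun d x => d.insert x (d.getD x 0 + 1) := by
    funext d x; exact step_eq d x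
  simp only [hstep]
  rw [← List.foldl_append, PySem.Dict.foldl_insert_getD_add_one_eq_counter]
  rw [foldl_app, PySem.Dict.items_counter]
  simp only [List.nil_append, List.filter_map, List.map_map, PySem.Dict.getD_counter]
  simp [Function.comp_def]

-- ===== VERDICT (by name: the statement is the Claim_ definition above) =====
theorem exclusive_elemts_spec : Claim_equal_exclusive_elemts := by
  intro lst1 lst2 _
  unfold Spec_exclusive_elemts exclusive_elemts_alt
  rw [counter_char]
  show _ = (lst1 ++ lst2).filter (fun x => (lst1 ++ lst2).count x == 1)
  rw [PySem.Set.ofList_eq_foldl, foldl_add_filter]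
  · rw [List.filter_nil, List.nil_append]
    apply List.filter_congr
    intro x _
    by_cases h : (lst1 ++ lst2).count x = 1 <;> simp [h]
    omega
  · intro x hx
    rw [List.nil_append]
    have : ((lst1 ++ lst2).count x : Int) = 1 := by simpa using hx
    omega
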